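-- pv_equiv track=rewrite | github.com/ppotepa/WBeam | src/domains/training/wizard.py | parse_encoder_list
-- ===== SOURCE A (Python) =====
-- from typing import Any
--
-- def parse_encoder_list(raw: str) -> list[str]:
--     out: list[str] = []
--     for part in raw.replace(";", ",").split(","):
--         token = part.strip().lower()
--         if not token:
--             continue
--         if token == "jpeg":
--             token = "mjpeg"
--         if token in {"h264", "h265", "rawpng", "mjpeg"}:
--             out.append(token)
--     return dedupe_keep_order(out)
--
-- def dedupe_keep_order(items: list[Any]) -> list[Any]:
--     seen: set[Any] = set()
--     out: list[Any] = []
--     for item in items: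
--         if item in seen:
--             continue
--         seen.add(item)
--         out.append(item)
--     return out
-- ===== SOURCE B (Python) =====
-- def parse_encoder_list(raw: str) -> list[str]:
--     tokens = ["mjpeg" if t == "jpeg" else t
--               for t in (p.strip().lower() for p in raw.replace(";", ",").split(","))]
--     pairs = []
--     for canon in ("h264", "h265", "rawpng", "mjpeg"):
--         try:
--             pairs.append((tokens.index(canon), canon))
--         except ValueError:
--             pass
--     pairs.sort(key=lambda pc: pc[0])
--     return [c for _, c in pairs]
-- ===== Notes on version B (the rewrite author's own statement) =====
-- stated objective: alternative
-- what changed: Instead of scanning the tokens accumulating valid ones and then deduplicating with a seen set, B looks up the first-occurrence index of each of the four canonical encoder names in the normalized token list and sorts the found (index, name) pairs by index.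
import Mathlib
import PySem

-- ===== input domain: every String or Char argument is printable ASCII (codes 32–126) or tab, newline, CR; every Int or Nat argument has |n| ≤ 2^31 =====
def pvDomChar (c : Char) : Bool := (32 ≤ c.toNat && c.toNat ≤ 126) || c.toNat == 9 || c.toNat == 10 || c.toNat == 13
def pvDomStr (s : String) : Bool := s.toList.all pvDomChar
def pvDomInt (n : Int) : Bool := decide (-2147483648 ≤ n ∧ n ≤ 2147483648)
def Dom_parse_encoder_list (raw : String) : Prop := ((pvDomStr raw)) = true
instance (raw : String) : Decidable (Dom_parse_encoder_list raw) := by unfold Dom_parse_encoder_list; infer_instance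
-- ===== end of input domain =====

-- B replaces A's scan-filter-append loop plus seen-set dedupe by a different algorithm:
-- for each of the four canonical encoders it looks up the FIRST occurrence index among the
-- normalized tokens, then sorts the found (index, name) pairs by index (objective: alternative).

-- ===== PORT A =====
-- helper of A: dedupe_keep_order, with its seen set and out list
def dedupe_keep_order (items : List String) : List String :=
  (items.foldl
    (fun (st : PySem.Set String × List String) item =>
      if PySem.Set.contains st.1 item then st
      else (PySem.Set.add st.1 item, st.2 ++ [item]))
    ((PySem.Set.empty : PySem.Set String), ([] : List String))).2

def parse_encoder_list (raw : String) : List String :=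
  let parts := (PySem.Str.split? (PySem.Str.replace raw ";" ",") ",").getD []
  let out := parts.foldl
    (fun (out : List String) part =>
      let token := PySem.Str.lower (PySem.Str.strip part)
      if token = "" then out
      else
        let token := if token = "jpeg" then "mjpeg" else token
        if token = "h264" ∨ token = "h265" ∨ token = "rawpng" ∨ token = "mjpeg" then
          out ++ [token]
        else out) []
  dedupe_keep_order out

-- ===== PORT B =====
def pvCanon : List String := ["h264", "h265", "rawpng", "mjpeg"]

def parse_encoder_list_alt (raw : String) : List String :=
  let tokens := (((PySem.Str.split? (PySem.Str.replace raw ";" ",") ",").getD []).map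
      (fun p => PySem.Str.lower (PySem.Str.strip p))).map
      (fun t => if t = "jpeg" then "mjpeg" else t)
  let pairs := pvCanon.foldl
    (fun (acc : List (Nat × String)) canon =>
      match PySem.List.index? tokens canon with   -- try: tokens.index(canon) / except ValueError: pass
      | some i => acc ++ [(i, canon)]
      | none => acc) []
  (PySem.List.sorted pairs (fun pc => pc.1) false).map (fun pc => pc.2)

-- ===== PRECONDITION & SPEC =====
def Spec_parse_encoder_list (raw : String) (out : List String) : Prop := out = parse_encoder_list_alt raw
instance (raw : String) (out : List String) : Decidable (Spec_parse_encoder_list raw out) := by unfold Spec_parse_encoder_list; infer_instance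

-- ===== CLAIM (what is proved, stated in full; the proofs are below) =====
def Claim_equal_parse_encoder_list : Prop := ∀ (raw : String), Dom_parse_encoder_list raw → Spec_parse_encoder_list raw (parse_encoder_list raw)

-- ===== LEMMAS AND PROOFS =====

-- first-occurrence index of a member, as a Nat
def pvIdx (ts : List String) (x : String) : Nat := (PySem.List.index? ts x).getD 0

theorem pvIdx_spec (ts : List String) (x : String) (hx : x ∈ ts) :
    PySem.List.index? ts x = some (pvIdx ts x) := by
  have h := (PySem.List.index?_isSome_iff ts x).2 hx
  unfold pvIdx
  cases hidx : PySem.List.index? ts x with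
  | none => rw [hidx] at h; simp at h
  | some k => rfl

theorem pvIdx_cons_self (ts : List String) (x : String) : pvIdx (x :: ts) x = 0 := by
  unfold pvIdx; rw [PySem.List.index?_cons_self]; rfl

theorem pvIdx_cons_ne (ts : List String) (x y : String) (hne : x ≠ y) (hy : y ∈ ts) :
    pvIdx (x :: ts) y = pvIdx ts y + 1 := by
  unfold pvIdx
  rw [PySem.List.index?_cons_of_ne _ hne, pvIdx_spec ts y hy]
  rfl

-- the dedupe fold's out component is PySem.List.dedup (reused from A's helper analysis)
theorem dedupe_state (items : List String) (s : PySem.Set String) :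
    items.foldl
      (fun (st : PySem.Set String × List String) item =>
        if PySem.Set.contains st.1 item then st
        else (PySem.Set.add st.1 item, st.2 ++ [item]))
      (s, (s : List String))
      = (items.foldl PySem.Set.add s, items.foldl PySem.Set.add s) := by
  induction items generalizing s with
  | nil => rfl
  | cons x xs ih =>
    simp only [List.foldl_cons]
    by_cases h : PySem.Set.contains s x
    · have hx : x ∈ s := by simpa [PySem.Set.contains] using h
      have hadd : PySem.Set.add s x = s := by simp [PySem.Set.add, hx]
      rw [if_pos h, hadd]
      exact ih s
    · have hx : x ∉ s := by simpa [PySem.Set.contains] using h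
      have hadd : PySem.Set.add s x = s ++ [x] := by simp [PySem.Set.add, hx]
      rw [if_neg h, hadd]
      exact ih (s ++ [x])

theorem dedupe_eq_dedup (items : List String) :
    dedupe_keep_order items = PySem.List.dedup items := by
  unfold dedupe_keep_order
  rw [show ((PySem.Set.empty : PySem.Set String), ([] : List String))
        = ((PySem.Set.empty : PySem.Set String), (PySem.Set.empty : List String)) from rfl,
     dedupe_state]
  rw [PySem.List.dedup_eq_ofList, PySem.Set.ofList_eq_foldl]
  rfl

-- A's filtering loop equals filter of the normalized token list
theorem loop_eq_filter_map (parts : List String) (acc : List String) :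
    parts.foldl
      (fun (out : List String) part =>
        let token := PySem.Str.lower (PySem.Str.strip part)
        if token = "" then out
        else
          let token := if token = "jpeg" then "mjpeg" else token
          if token = "h264" ∨ token = "h265" ∨ token = "rawpng" ∨ token = "mjpeg" then
            out ++ [token]
          else out) acc
    = acc ++ ((parts.map (fun p =>
        let t := PySem.Str.lower (PySem.Str.strip p)
        if t = "jpeg" then "mjpeg" else t)).filter (fun t => t ∈ pvCanon)) := by
  induction parts generalizing acc with
  | nil => simp
  | cons p ps ih =>
    simp only [List.foldl_cons, List.map_cons, List.filter_cons]
    set t := PySem.Str.lower (PySem.Str.strip p) with ht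
    by_cases h0 : t = ""
    · have hm : ((if t = "jpeg" then "mjpeg" else t) ∈ pvCanon) = False := by
        rw [h0]; simp [pvCanon]
      simp only [if_pos h0, hm]
      rw [ih]
      simp
    · simp only [if_neg h0]
      set t' := if t = "jpeg" then "mjpeg" else t with ht'
      by_cases hv : t' ∈ pvCanon
      · have hb : (t' = "h264" ∨ t' = "h265" ∨ t' = "rawpng" ∨ t' = "mjpeg") := by
          simpa [pvCanon] using hv
        rw [if_pos hb, ih]
        simp [hv]
      · have hb : ¬(t' = "h264" ∨ t' = "h265" ∨ t' = "rawpng" ∨ t' = "mjpeg") := by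
          simpa [pvCanon] using hv
        rw [if_neg hb, ih]
        simp [hv]

-- dedup's fold over an arbitrary starting set
theorem ofList_foldl_add (m : List String) (s : PySem.Set String) :
    m.foldl PySem.Set.add s = s ++ (PySem.List.dedup m).filter (fun y => y ∉ s) := by
  induction m generalizing s with
  | nil => simp
  | cons x m' ih =>
    rw [List.foldl_cons]
    rw [ih (PySem.Set.add s x)]
    have hx : PySem.List.dedup (x :: m')
        = [x] ++ (PySem.List.dedup m').filter (fun y => y ∉ ([x] : List String)) := by
      rw [PySem.List.dedup_eq_ofList, PySem.Set.ofList_eq_foldl, List.foldl_cons]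
      have h1 : PySem.Set.add ([] : PySem.Set String) x = [x] := by simp [PySem.Set.add]
      rw [h1, ih [x]]
    rw [hx]
    by_cases hxs : x ∈ s
    · have hadd : PySem.Set.add s x = s := by simp [PySem.Set.add, hxs]
      rw [hadd]
      simp only [List.filter_append, List.filter_filter]
      have h0 : List.filter (fun y => decide (y ∉ s)) [x] = [] := by simp [hxs]
      rw [h0, List.nil_append]
      congr 1
      apply List.filter_congr
      intro y _
      by_cases hys : y ∈ s
      · simp [hys]
      · have hyx : y ≠ x := fun h => hys (h ▸ hxs)
        simp [hys, hyx]
    · have hadd : PySem.Set.add s x = s ++ [x] := by simp [PySem.Set.add, hxs]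
      rw [hadd]
      simp only [List.filter_append, List.filter_filter, List.append_assoc]
      congr 1
      have hxf : List.filter (fun y => decide (y ∉ s)) [x] = [x] := by simp [hxs]
      rw [show ([x] : List String) = List.filter (fun y => decide (y ∉ s)) [x] from hxf.symm]
      congr 1
      · simp [hxs]
      · apply List.filter_congr
        intro y _
        by_cases hyx : y = x
        · subst hyx; simp [hxs]
        · simp [hyx]

theorem dedup_cons (x : String) (m : List String) :
    PySem.List.dedup (x :: m) = x :: (PySem.List.dedup m).filter (fun y => y ≠ x) := by
  rw [PySem.List.dedup_eq_ofList, PySem.Set.ofList_eq_foldl, List.foldl_cons]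
  have : PySem.Set.add ([] : PySem.Set String) x = [x] := by simp [PySem.Set.add]
  rw [this, ofList_foldl_add]
  simp [PySem.List.dedup_eq_ofList]

-- A's dedup order is the order of first occurrence in the full token list
theorem dedup_filter_pairwise (p : String → Bool) (ts : List String) :
    (PySem.List.dedup (ts.filter p)).Pairwise (fun a b => pvIdx ts a < pvIdx ts b) := by
  induction ts with
  | nil => simp
  | cons x ts' ih =>
    rw [List.filter_cons]
    by_cases hpx : p x
    · rw [if_pos hpx, dedup_cons]
      constructor
      · intro y hy
        have hy' := List.of_mem_filter hy
        have hyne : y ≠ x := by simpa using hy'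
        have hym : y ∈ ts' := by
          have : y ∈ PySem.List.dedup (ts'.filter p) := List.mem_of_mem_filter hy
          have := (PySem.List.mem_dedup _ _).1 this
          exact List.mem_of_mem_filter this
        rw [pvIdx_cons_self, pvIdx_cons_ne ts' x y (fun h => hyne h.symm) hym]
        omega
      · have hsub : ((PySem.List.dedup (ts'.filter p)).filter (fun y => y ≠ x)).Sublist
            (PySem.List.dedup (ts'.filter p)) := List.filter_sublist
        have hpw := ih.sublist hsub
        apply List.Pairwise.imp_of_mem ?_ hpw
        intro a b ha hb hab
        have hane : a ≠ x := by simpa using List.of_mem_filter ha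
        have hbne : b ≠ x := by simpa using List.of_mem_filter hb
        have ham : a ∈ ts' := List.mem_of_mem_filter ((PySem.List.mem_dedup _ _).1 (List.mem_of_mem_filter ha))
        have hbm : b ∈ ts' := List.mem_of_mem_filter ((PySem.List.mem_dedup _ _).1 (List.mem_of_mem_filter hb))
        rw [pvIdx_cons_ne ts' x a (fun h => hane h.symm) ham,
            pvIdx_cons_ne ts' x b (fun h => hbne h.symm) hbm]
        omega
    · rw [if_neg hpx]
      apply List.Pairwise.imp_of_mem ?_ ih
      intro a b ha hb hab
      have hap : p a := List.of_mem_filter ((PySem.List.mem_dedup _ _).1 ha)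
      have hbp : p b := List.of_mem_filter ((PySem.List.mem_dedup _ _).1 hb)
      have ham : a ∈ ts' := List.mem_of_mem_filter ((PySem.List.mem_dedup _ _).1 ha)
      have hbm : b ∈ ts' := List.mem_of_mem_filter ((PySem.List.mem_dedup _ _).1 hb)
      have hane : x ≠ a := fun h => by subst h; exact absurd hap (by simp [hpx])
      have hbne : x ≠ b := fun h => by subst h; exact absurd hbp (by simp [hpx])
      rw [pvIdx_cons_ne ts' x a hane ham, pvIdx_cons_ne ts' x b hbne hbm]
      omega

-- B's pair-collecting loop is a filterMap over the candidate list
theorem pairs_loop_eq_filterMap (cs : List String) (ts : List String) (acc : List (Nat × String)) :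
    cs.foldl
      (fun (acc : List (Nat × String)) canon =>
        match PySem.List.index? ts canon with
        | some i => acc ++ [(i, canon)]
        | none => acc) acc
    = acc ++ cs.filterMap (fun c => (PySem.List.index? ts c).map (fun i => (i, c))) := by
  induction cs generalizing acc with
  | nil => simp
  | cons c cs' ih =>
    rw [List.foldl_cons, List.filterMap_cons]
    cases h : PySem.List.index? ts c with
    | none => rw [ih]; rfl
    | some i => rw [ih]; simp

-- the central equality: dedup-filter = sort-by-first-index of the found pairs
theorem central (ts : List String) :
    PySem.List.dedup (ts.filter (fun t => t ∈ pvCanon))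
    = (PySem.List.sorted
        (pvCanon.filterMap (fun c => (PySem.List.index? ts c).map (fun i => (i, c))))
        (fun pc => pc.1) false).map (fun pc => pc.2) := by
  set D := PySem.List.dedup (ts.filter (fun t => t ∈ pvCanon)) with hD
  set DP := D.map (fun c => (pvIdx ts c, c)) with hDP
  have hmemD : ∀ c, c ∈ D ↔ (c ∈ ts ∧ c ∈ pvCanon) := by
    intro c
    rw [hD, PySem.List.mem_dedup _ _, List.mem_filter]
    simp
  have hperm : DP.Perm (pvCanon.filterMap (fun c => (PySem.List.index? ts c).map (fun i => (i, c)))) := by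
    rw [List.perm_ext_iff_of_nodup]
    · intro pc
      rcases pc with ⟨i, c⟩
      constructor
      · intro h
        rw [hDP] at h
        rcases List.mem_map.1 h with ⟨c', hc', heq⟩
        obtain ⟨rfl, rfl⟩ : pvIdx ts c' = i ∧ c' = c := by
          exact ⟨congrArg Prod.fst heq, congrArg Prod.snd heq⟩
        rcases (hmemD c').1 hc' with ⟨hts, hcv⟩
        apply List.mem_filterMap.2
        exact ⟨c', hcv, by rw [pvIdx_spec ts c' hts]; rfl⟩
      · intro h
        rcases List.mem_filterMap.1 h with ⟨c', hc', hsome⟩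
        cases hidx : PySem.List.index? ts c' with
        | none => rw [hidx] at hsome; simp at hsome
        | some k =>
          rw [hidx] at hsome
          simp only [Option.map_some] at hsome
          obtain ⟨rfl, rfl⟩ : k = i ∧ c' = c := by
            injection hsome with h'
            exact ⟨congrArg Prod.fst h', congrArg Prod.snd h'⟩
          have hts : c' ∈ ts := (PySem.List.index?_isSome_iff _ _).1 (by rw [hidx]; rfl)
          have : pvIdx ts c' = k := by
            have := pvIdx_spec ts c' hts
            rw [hidx] at this
            injection this with h'
            omega
          rw [hDP]
          exact List.mem_map.2 ⟨c', (hmemD c').2 ⟨hts, hc'⟩, by rw [this]⟩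
    · rw [hDP]
      apply List.Nodup.map
      · intro a b hab
        exact congrArg Prod.snd hab
      · rw [hD]; exact PySem.List.nodup_dedup _
    · apply List.Nodup.filterMap
      · intro a a' b hb hb'
        cases ha : PySem.List.index? ts a with
        | none => rw [ha] at hb; simp at hb
        | some i =>
          cases ha' : PySem.List.index? ts a' with
          | none => rw [ha'] at hb'; simp at hb'
          | some i' =>
            rw [ha] at hb; rw [ha'] at hb'
            simp only [Option.map_some, Option.mem_def, Option.some_inj] at hb hb'
            have : a = b.2 := congrArg Prod.snd hb
            have h2 : a' = b.2 := congrArg Prod.snd hb'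
            rw [this, h2]
      · decide
  have hpw : DP.Pairwise (fun a b => a.1 < b.1) := by
    rw [hDP]
    apply List.Pairwise.map
    · intro a b h
      exact h
    · exact dedup_filter_pairwise _ ts
  have e : PySem.List.sorted
      (pvCanon.filterMap (fun c => (PySem.List.index? ts c).map (fun i => (i, c))))
      (fun pc => pc.1) false = DP :=
    PySem.List.sorted_eq_of_perm_of_pairwise_lt _ _ _ hperm hpw
  rw [e, hDP, List.map_map]
  exact (List.map_id D).symm

-- ===== VERDICT (by name: the statement is the Claim_ definition above) =====
set_option maxHeartbeats 1000000 in
theorem parse_encoder_list_spec : Claim_equal_parse_encoder_list := by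
  intro raw _
  show parse_encoder_list raw = parse_encoder_list_alt raw
  simp only [parse_encoder_list, parse_encoder_list_alt]
  rw [loop_eq_filter_map, List.nil_append, dedupe_eq_dedup, List.map_map,
      pairs_loop_eq_filterMap, List.nil_append]
  have hcomp : ((fun t => if t = "jpeg" then "mjpeg" else t) ∘ fun p => PySem.Str.lower (PySem.Str.strip p))
      = (fun p => let t := PySem.Str.lower (PySem.Str.strip p); if t = "jpeg" then "mjpeg" else t) := by
    funext p; simp only [Function.comp_apply]
  rw [hcomp]
  exact central _
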